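-- pv_equiv track=rewrite | github.com/vivekworks/learning-to-code | 4. Discovering Computer Science/Python/Chapter 6 - Text, Documents & DNA/Exercises 6/exercise664.py | hamming
-- ===== SOURCE A (Python) =====
-- def hamming(bits1, bits2):
--         distance=0
--         if len(bits1)>len(bits2):
--                 length=len(bits1)
--         else:
--                 length=len(bits2)
--         for index in range(length):
--                 if index<len(bits1) and index<len(bits2) and bits1[index] != bits2[index]:
--                     distance+=1
--                 elif (index>=len(bits1) and index<len(bits2)) or (index>=len(bits2) and index<len(bits1)):
--                         distance+=1
--         return distance
-- ===== SOURCE B (Python) =====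
-- def hamming(bits1, bits2):
--     return sum(a != b for a, b in zip(bits1, bits2)) + abs(len(bits1) - len(bits2))
-- ===== Notes on version B (the rewrite author's own statement) =====
-- stated objective: simpler
-- what changed: Replaces the max-length index loop with per-index bounds checks by a zip over the overlapping prefix plus a closed-form abs(len difference) for the tail (C-level zip/sum instead of a Python-level per-index loop).
import Mathlib
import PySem

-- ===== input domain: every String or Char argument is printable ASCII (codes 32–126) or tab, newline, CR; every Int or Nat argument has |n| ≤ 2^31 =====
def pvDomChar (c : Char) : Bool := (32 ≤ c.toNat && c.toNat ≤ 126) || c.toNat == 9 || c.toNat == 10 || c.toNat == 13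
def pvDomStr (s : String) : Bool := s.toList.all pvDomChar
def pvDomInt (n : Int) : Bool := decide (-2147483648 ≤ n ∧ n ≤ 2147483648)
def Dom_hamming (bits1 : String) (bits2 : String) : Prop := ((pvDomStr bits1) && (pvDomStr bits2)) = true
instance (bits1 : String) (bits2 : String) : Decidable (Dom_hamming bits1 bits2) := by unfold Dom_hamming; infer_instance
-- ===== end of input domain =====

-- B computes the mismatches over the zipped overlap and adds the length difference in closed form,
-- instead of A's loop to the max length with per-index bounds checks. Objective: simpler.

-- ===== PORT A =====
def hamming (bits1 : String) (bits2 : String) : Int :=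
  let distance : Int := 0
  let length : Int :=
    if PySem.Str.len bits1 > PySem.Str.len bits2 then PySem.Str.len bits1
    else PySem.Str.len bits2
  (PySem.List.pyRange 0 length 1).foldl (fun distance index =>
    if index < PySem.Str.len bits1 ∧ index < PySem.Str.len bits2 ∧
        PySem.Str.pyGet? bits1 index ≠ PySem.Str.pyGet? bits2 index then
      distance + 1
    else if (index ≥ PySem.Str.len bits1 ∧ index < PySem.Str.len bits2) ∨
            (index ≥ PySem.Str.len bits2 ∧ index < PySem.Str.len bits1) then
      distance + 1
    else distance) distance

-- ===== PORT B =====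
def hamming_alt (bits1 : String) (bits2 : String) : Int :=
  (bits1.toList.zip bits2.toList).foldl
      (fun acc p => acc + (if p.1 != p.2 then 1 else 0)) 0
    + |PySem.Str.len bits1 - PySem.Str.len bits2|

-- ===== PRECONDITION & SPEC =====
def Spec_hamming (bits1 : String) (bits2 : String) (out : Int) : Prop := out = hamming_alt bits1 bits2
instance (bits1 : String) (bits2 : String) (out : Int) : Decidable (Spec_hamming bits1 bits2 out) := by unfold Spec_hamming; infer_instance

-- ===== CLAIM (what is proved, stated in full; the proofs are below) =====
def Claim_equal_hamming : Prop := ∀ (bits1 : String) (bits2 : String), Dom_hamming bits1 bits2 → Spec_hamming bits1 bits2 (hamming bits1 bits2)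

-- ===== LEMMAS AND PROOFS =====

-- fold over the first min-length indices equals the zip fold
lemma pv_core (xs ys : List Char) : ∀ (n : Nat), n ≤ xs.length → n ≤ ys.length → ∀ (acc : Int),
    (PySem.List.pyRange 0 (n : Int) 1).foldl
        (fun a i => if PySem.List.pyGet? xs i ≠ PySem.List.pyGet? ys i then a + 1 else a) acc
    = ((xs.zip ys).take n).foldl (fun a p => a + (if p.1 != p.2 then 1 else 0)) acc := by
  intro n
  induction n with
  | zero => intro _ _ acc; simp [PySem.List.pyRange_one_eq_nil]
  | succ n ih =>
    intro h1 h2 acc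
    have hxn : n < xs.length := by omega
    have hyn : n < ys.length := by omega
    have hz : n < (xs.zip ys).length := by simp [List.length_zip]; omega
    have hr : PySem.List.pyRange 0 ((n : Int) + 1) 1
        = PySem.List.pyRange 0 (n : Int) 1 ++ [(n : Int)] :=
      PySem.List.pyRange_one_succ_right (by positivity)
    have hp : (xs.zip ys)[n]? = some (xs[n], ys[n]) := by
      simp [List.getElem?_eq_getElem hz, List.getElem_zip]
    have ht : ((xs.zip ys).take (n + 1))
        = ((xs.zip ys).take n) ++ [(xs[n], ys[n])] := by
      rw [List.take_add_one, hp]; rfl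
    have hx : PySem.List.pyGet? xs (n : Int) = some xs[n] := by
      simp [PySem.List.pyGet?_natCast, List.getElem?_eq_getElem hxn]
    have hy : PySem.List.pyGet? ys (n : Int) = some ys[n] := by
      simp [PySem.List.pyGet?_natCast, List.getElem?_eq_getElem hyn]
    push_cast
    rw [hr, ht, List.foldl_append, List.foldl_append,
        ih (by omega) (by omega) acc]
    simp only [List.foldl_cons, List.foldl_nil, hx, hy]
    by_cases h : xs[n] = ys[n] <;> simp [h]

lemma pv_foldl_add_one (l : List Int) (S : Int) :
    l.foldl (fun a _ => a + 1) S = S + l.length := by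
  induction l generalizing S with
  | nil => simp
  | cons x l ih => simp [ih]; ring

def pvStep (xs ys : List Char) (distance : Int) (index : Int) : Int :=
  if index < (xs.length : Int) ∧ index < (ys.length : Int) ∧
      PySem.List.pyGet? xs index ≠ PySem.List.pyGet? ys index then distance + 1
  else if (index ≥ (xs.length : Int) ∧ index < (ys.length : Int)) ∨
          (index ≥ (ys.length : Int) ∧ index < (xs.length : Int)) then distance + 1
  else distance

lemma pv_main (xs ys : List Char) :
    (PySem.List.pyRange 0
        (if (xs.length : Int) > (ys.length : Int) then (xs.length : Int) else (ys.length : Int)) 1).foldl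
      (pvStep xs ys) 0
    = (xs.zip ys).foldl (fun acc p => acc + (if p.1 != p.2 then 1 else 0)) 0
      + |(xs.length : Int) - (ys.length : Int)| := by
  set m : Nat := min xs.length ys.length with hm
  set M : Nat := max xs.length ys.length with hM
  have hL : (if (xs.length : Int) > (ys.length : Int) then (xs.length : Int) else (ys.length : Int)) = (M : Int) := by
    simp only [hM, Nat.cast_max]; split_ifs <;> omega
  rw [hL]
  have hsplit : PySem.List.pyRange 0 (M : Int) 1
      = PySem.List.pyRange 0 (m : Int) 1 ++ PySem.List.pyRange (m : Int) (M : Int) 1 :=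
    PySem.List.pyRange_one_append 0 (m : Int) (M : Int) (by positivity)
      (by simp only [hm, hM]; push_cast [Nat.cast_min, Nat.cast_max]; omega)
  rw [hsplit, List.foldl_append]
  have hcongr1 : (PySem.List.pyRange 0 (m : Int) 1).foldl
      (pvStep xs ys) 0
      = (PySem.List.pyRange 0 (m : Int) 1).foldl
      (fun a i => if PySem.List.pyGet? xs i ≠ PySem.List.pyGet? ys i then a + 1 else a) 0 := by
    apply PySem.List.foldl_congr_mem
    intro a i hi
    unfold pvStep
    rw [PySem.List.mem_pyRange_one] at hi
    have h1 : i < (xs.length : Int) := by simp only [hm, Nat.cast_min] at hi; omega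
    have h2 : i < (ys.length : Int) := by simp only [hm, Nat.cast_min] at hi; omega
    by_cases h : PySem.List.pyGet? xs i = PySem.List.pyGet? ys i <;> simp [h, h1, h2]
  simp only [hcongr1]
  rw [pv_core xs ys m (by omega) (by omega) 0]
  have htake : (xs.zip ys).take m = xs.zip ys := by
    apply List.take_of_length_le; simp [List.length_zip]; omega
  rw [htake]
  have hcongr2 : ∀ S : Int, (PySem.List.pyRange (m : Int) (M : Int) 1).foldl
      (pvStep xs ys) S
      = (PySem.List.pyRange (m : Int) (M : Int) 1).foldl (fun a _ => a + 1) S := by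
    intro S
    apply PySem.List.foldl_congr_mem
    intro a i hi
    unfold pvStep
    rw [PySem.List.mem_pyRange_one] at hi
    simp only [hm, Nat.cast_min, hM, Nat.cast_max] at hi
    have hnot : ¬ ((i : Int) < (xs.length : Int) ∧ i < (ys.length : Int)) := by omega
    have hor : (i ≥ (xs.length : Int) ∧ i < (ys.length : Int)) ∨
               (i ≥ (ys.length : Int) ∧ i < (xs.length : Int)) := by omega
    rw [if_neg (by tauto), if_pos hor]
  simp only [hcongr2]
  rw [pv_foldl_add_one, PySem.List.length_pyRange_one]
  have habs : |(xs.length : Int) - (ys.length : Int)| = (M : Int) - (m : Int) := by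
    simp only [hm, hM]
    push_cast [Nat.cast_min, Nat.cast_max]
    rcases le_total xs.length ys.length with h | h
    · rw [abs_of_nonpos (by omega)]; omega
    · rw [abs_of_nonneg (by omega)]; omega
  rw [habs]
  have hmm : (m : Int) ≤ (M : Int) := by simp only [hm, hM]; push_cast [Nat.cast_min, Nat.cast_max]; omega
  omega

theorem hamming_spec : Claim_equal_hamming := by
  intro bits1 bits2 _
  unfold Spec_hamming hamming hamming_alt
  simp only [PySem.Str.len_eq, PySem.Str.pyGet?]
  exact pv_main bits1.toList bits2.toList
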